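-- pv_equiv track=rewrite | github.com/Kyrd0x/furdz | ducky/duck2ino.py | _build_delay_bytes
-- ===== SOURCE A (Python) =====
-- from typing import List, Dict, Tuple, Optional, Union
--
-- def _build_delay_bytes(delay: int) -> List[str]:
--     """Build delay byte array"""
--     byte_array = []
--     while delay > 0:
--         byte_array.append('00')
--         if delay > 255:
--             byte_array.append('FF')
--             delay -= 255
--         else:
--             byte_array.append(format(delay, '02x'))
--             delay = 0
--     return byte_array
-- ===== SOURCE B (Python) =====
-- from typing import List
--
-- def _build_delay_bytes(delay: int) -> List[str]:
--     """Build delay byte array: closed-form chunk count instead of a subtracting loop."""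
--     if delay <= 0:
--         return []
--     n = (delay - 1) // 255  # number of full 255 chunks
--     return ['00', 'FF'] * n + ['00', format(delay - 255 * n, '02x')]
-- ===== Notes on version B (the rewrite author's own statement) =====
-- stated objective: alternative
-- what changed: Replaced the subtracting while-loop that emits one chunk per iteration with a closed-form full-chunk count, building the full chunks by list repetition and the final partial chunk directly.
import Mathlib
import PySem

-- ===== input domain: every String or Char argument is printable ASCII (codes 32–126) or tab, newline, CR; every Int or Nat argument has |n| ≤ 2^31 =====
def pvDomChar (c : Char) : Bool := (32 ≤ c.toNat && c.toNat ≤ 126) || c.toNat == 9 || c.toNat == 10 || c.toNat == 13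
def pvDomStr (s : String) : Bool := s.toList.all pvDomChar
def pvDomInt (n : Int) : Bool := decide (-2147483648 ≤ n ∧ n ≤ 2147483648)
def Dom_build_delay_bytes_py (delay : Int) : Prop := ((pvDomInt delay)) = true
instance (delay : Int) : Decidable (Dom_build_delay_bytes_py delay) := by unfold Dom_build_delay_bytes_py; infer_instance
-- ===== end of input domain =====

-- B replaces A's subtracting loop by a closed-form chunk count (alternative closed-form construction).

-- shared helper: format(d, '02x') — exact for 0 ≤ d ≤ 255 (the only values either program formats)
def pvHexDigit (n : Nat) : Char := if n < 10 then Char.ofNat (48 + n) else Char.ofNat (87 + n)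
def pvFmt02x (d : Int) : String := String.ofList [pvHexDigit (d.toNat / 16), pvHexDigit (d.toNat % 16)]

-- ===== PORT A =====
def build_delay_bytes_py (delay : Int) : List String :=
  if h0 : delay > 0 then
    if h1 : delay > 255 then
      "00" :: "FF" :: build_delay_bytes_py (delay - 255)
    else
      ["00", pvFmt02x delay]
  else []
termination_by delay.toNat
decreasing_by omega

-- ===== PORT B =====
def build_delay_bytes_py_alt (delay : Int) : List String :=
  if delay ≤ 0 then []
  else
    let n := PySem.Int.floordiv (delay - 1) 255
    List.flatten (List.replicate n.toNat ["00", "FF"]) ++ ["00", pvFmt02x (delay - 255 * n)]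

-- ===== PRECONDITION & SPEC =====
def Spec_build_delay_bytes_py (delay : Int) (out : List String) : Prop := out = build_delay_bytes_py_alt delay
instance (delay : Int) (out : List String) : Decidable (Spec_build_delay_bytes_py delay out) := by unfold Spec_build_delay_bytes_py; infer_instance

-- ===== CLAIM (what is proved, stated in full; the proofs are below) =====
def Claim_equal_build_delay_bytes_py : Prop := ∀ (delay : Int), Dom_build_delay_bytes_py delay → Spec_build_delay_bytes_py delay (build_delay_bytes_py delay)

-- ===== LEMMAS AND PROOFS =====

-- B satisfies A's loop recurrence for delay > 255
theorem alt_rec (delay : Int) (h : delay > 255) :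
    build_delay_bytes_py_alt delay = "00" :: "FF" :: build_delay_bytes_py_alt (delay - 255) := by
  have h1 : ¬ delay ≤ 0 := by omega
  have h2 : ¬ delay - 255 ≤ 0 := by omega
  simp only [build_delay_bytes_py_alt, h1, h2, if_false]
  rw [PySem.Int.floordiv_eq_ediv_of_pos (by omega), PySem.Int.floordiv_eq_ediv_of_pos (by omega)]
  have hrec : (delay - 255 - 1) / 255 = (delay - 1) / 255 - 1 := by omega
  have hn : 1 ≤ (delay - 1) / 255 := by omega
  rw [hrec]
  have htn : ((delay - 1) / 255).toNat = ((delay - 1) / 255 - 1).toNat + 1 := by omega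
  rw [htn, List.replicate_succ, List.flatten_cons]
  have harg : delay - 255 - 255 * ((delay - 1) / 255 - 1) = delay - 255 * ((delay - 1) / 255) := by ring
  rw [harg]
  simp

theorem build_eq (delay : Int) : build_delay_bytes_py delay = build_delay_bytes_py_alt delay := by
  rw [build_delay_bytes_py]
  by_cases h0 : delay > 0
  · by_cases h1 : delay > 255
    · rw [dif_pos h0, dif_pos h1, build_eq (delay - 255), alt_rec delay h1]
    · rw [dif_pos h0, dif_neg h1]
      have h2 : ¬ delay ≤ 0 := by omega
      simp only [build_delay_bytes_py_alt, h2, if_false]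
      rw [PySem.Int.floordiv_eq_ediv_of_pos (by omega)]
      have hz : (delay - 1) / 255 = 0 := by omega
      rw [hz]
      simp
  · rw [dif_neg h0]
    have h2 : delay ≤ 0 := by omega
    simp [build_delay_bytes_py_alt, h2]
termination_by delay.toNat
decreasing_by omega

-- ===== VERDICT (by name: the statement is the Claim_ definition above) =====
theorem build_delay_bytes_py_spec : Claim_equal_build_delay_bytes_py := by
  intro delay _
  unfold Spec_build_delay_bytes_py
  exact build_eq delay
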